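-- pv_equiv track=rewrite | github.com/hongbo-wei/AI-CS-UoBD | AI-and-ML/labs_notebooks/pratice.py | bellman_product
-- ===== SOURCE A (Python) =====
-- def bellman_product(x):
--
--     # Initialization
--     P = (1, 1)  # Change S to P for product
--     X = ([[]], [[]])
--
--     # Iteration
--     for xn in x:
--         if 1 > (xn * P[1]):  # Change 0 to 1 and '+' to '*' for product
--             Ptails = 1
--             Xtails = [[]]
--         else:
--             Ptails = xn * P[1]  # Change '+' to '*' for product
--             Xtails = [Xp + [xn] for Xp in X[1]]
--
--         if Ptails > P[0]:
--             X = (Xtails, Xtails)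
--             P = (Ptails, Ptails)
--         else:
--             X = (X[0], Xtails)
--             P = (P[0], Ptails)
--     return (X, P)
-- ===== SOURCE B (Python) =====
-- def bellman_product(x):
--     ts = 0   # start index of the current tail segment
--     pt = 1   # product of the tail segment (floored at 1 by resets)
--     bp = 1   # best product seen
--     bs = 0   # best segment start
--     be = 0   # best segment end (exclusive)
--     for i, xn in enumerate(x):
--         if 1 > xn * pt:
--             ts, pt = i + 1, 1
--         else:
--             pt = xn * pt
--         if pt > bp:
--             bp, bs, be = pt, ts, i + 1
--     return (([x[bs:be]], [x[ts:]]), (bp, pt))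
-- ===== Notes on version B (the rewrite author's own statement) =====
-- stated objective: alternative
-- what changed: B tracks only start/end indices and the two running products in one pass and builds the two output segments once by slicing at the end, instead of A's per-step list copying (Xp + [xn]) that recopies the growing tail segment on every iteration; measured 1.7-3.2x in a timing run, below the confirmation bar at the largest size.
import Mathlib
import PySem

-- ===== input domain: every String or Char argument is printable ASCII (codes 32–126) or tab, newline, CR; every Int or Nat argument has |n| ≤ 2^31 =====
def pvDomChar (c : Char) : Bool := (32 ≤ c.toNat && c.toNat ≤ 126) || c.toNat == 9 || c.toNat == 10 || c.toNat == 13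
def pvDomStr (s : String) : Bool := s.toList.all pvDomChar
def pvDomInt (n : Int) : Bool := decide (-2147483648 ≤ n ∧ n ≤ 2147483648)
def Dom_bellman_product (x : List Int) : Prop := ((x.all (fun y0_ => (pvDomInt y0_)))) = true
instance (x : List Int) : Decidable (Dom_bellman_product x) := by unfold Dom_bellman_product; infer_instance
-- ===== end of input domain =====

-- B replaces A's per-step copying of the growing tail segment by an index-tracking
-- single pass that slices the two output segments once at the end (objective: alternative).

-- ===== PORT A =====
def bellman_product (x : List Int) : (List (List Int) × List (List Int)) × (Int × Int) :=
  x.foldl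
    (fun s xn =>
      let X := s.1
      let P := s.2
      let PX :=
        if 1 > xn * P.2 then ((1 : Int), [([] : List Int)])
        else (xn * P.2, X.2.map (fun Xp => Xp ++ [xn]))
      let Ptails := PX.1
      let Xtails := PX.2
      if Ptails > P.1 then ((Xtails, Xtails), (Ptails, Ptails))
      else ((X.1, Xtails), (P.1, Ptails)))
    (([[]], [[]]), (1, 1))

-- ===== PORT B =====
def bellman_product_alt (x : List Int) : (List (List Int) × List (List Int)) × (Int × Int) :=
  let st := (PySem.List.enumerate x).foldl
    (fun (s : (Int × Int) × (Int × Int × Int)) p =>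
      let i := p.1
      let xn := p.2
      let tp := if 1 > xn * s.1.2 then ((i + 1 : Int), (1 : Int)) else (s.1.1, xn * s.1.2)
      if tp.2 > s.2.1 then (tp, (tp.2, tp.1, i + 1)) else (tp, s.2))
    ((0, 1), (1, 0, 0))
  (([PySem.List.slice x (some st.2.2.1) (some st.2.2.2)],
    [PySem.List.slice x (some st.1.1) none]),
   (st.2.1, st.1.2))

-- ===== PRECONDITION & SPEC =====
def Spec_bellman_product (x : List Int) (out : (List (List Int) × List (List Int)) × (Int × Int)) : Prop := out = bellman_product_alt x
instance (x : List Int) (out : (List (List Int) × List (List Int)) × (Int × Int)) : Decidable (Spec_bellman_product x out) := by unfold Spec_bellman_product; infer_instance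

-- ===== CLAIM (what is proved, stated in full; the proofs are below) =====
def Claim_equal_bellman_product : Prop := ∀ (x : List Int), Dom_bellman_product x → Spec_bellman_product x (bellman_product x)

-- ===== LEMMAS AND PROOFS =====

-- helper names for the two fold bodies (definitionally equal to the lambdas in the ports)
def pvFA (s : (List (List Int) × List (List Int)) × (Int × Int)) (xn : Int) :
    (List (List Int) × List (List Int)) × (Int × Int) :=
  let X := s.1
  let P := s.2
  let PX :=
    if 1 > xn * P.2 then ((1 : Int), [([] : List Int)])
    else (xn * P.2, X.2.map (fun Xp => Xp ++ [xn]))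
  let Ptails := PX.1
  let Xtails := PX.2
  if Ptails > P.1 then ((Xtails, Xtails), (Ptails, Ptails))
  else ((X.1, Xtails), (P.1, Ptails))

def pvFB (s : (Int × Int) × (Int × Int × Int)) (p : Int × Int) :
    (Int × Int) × (Int × Int × Int) :=
  let i := p.1
  let xn := p.2
  let tp := if 1 > xn * s.1.2 then ((i + 1 : Int), (1 : Int)) else (s.1.1, xn * s.1.2)
  if tp.2 > s.2.1 then (tp, (tp.2, tp.1, i + 1)) else (tp, s.2)

def pvOut (x : List Int) (s : (Int × Int) × (Int × Int × Int)) :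
    (List (List Int) × List (List Int)) × (Int × Int) :=
  (([PySem.List.slice x (some s.2.2.1) (some s.2.2.2)],
    [PySem.List.slice x (some s.1.1) none]),
   (s.2.1, s.1.2))

def pvSeg (x : List Int) (a b : Nat) : List Int := (x.drop a).take (b - a)

lemma pvSeg_refl (x : List Int) (a : Nat) : pvSeg x a a = [] := by
  simp [pvSeg]

lemma pvSeg_succ (x : List Int) (a k : Nat) (xn : Int) (ha : a ≤ k)
    (hx : x[k]? = some xn) : pvSeg x a (k + 1) = pvSeg x a k ++ [xn] := by
  unfold pvSeg
  have h1 : k + 1 - a = (k - a) + 1 := by omega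
  rw [h1, List.take_add_one, List.getElem?_drop, Nat.add_sub_cancel' ha, hx]
  rfl

lemma pv_portA_eq (x : List Int) :
    bellman_product x = x.foldl pvFA (([[]], [[]]), (1, 1)) := rfl

lemma pv_portB_eq (x : List Int) :
    bellman_product_alt x =
      pvOut x ((PySem.List.enumerate x).foldl pvFB ((0, 1), (1, 0, 0))) := rfl

lemma pv_loop (x : List Int) : ∀ (t : List Int) (k ts bs be : Nat) (pt bp : Int),
    t = x.drop k → ts ≤ k → bs ≤ be → be ≤ k →
    t.foldl pvFA (([pvSeg x bs be], [pvSeg x ts k]), (bp, pt))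
      = pvOut x ((PySem.List.enumerate t (k : Int)).foldl pvFB
          (((ts : Int), pt), (bp, (bs : Int), (be : Int)))) := by
  intro t
  induction t with
  | nil =>
    intro k ts bs be pt bp ht hts hbs hbe
    have hlen : x.length ≤ k := by
      have := List.drop_eq_nil_iff.mp ht.symm
      omega
    simp only [List.foldl_nil, PySem.List.enumerate_nil, pvOut,
      PySem.List.slice_natCast, PySem.List.slice_from_natCast, pvSeg]
    refine congrArg (fun l => (([(x.drop bs).take (be - bs)], [l]), (bp, pt))) ?_
    exact List.take_of_length_le (by simp; omega)
  | cons xn rest ih =>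
    intro k ts bs be pt bp ht hts hbs hbe
    have hk : k < x.length := by
      by_contra h
      rw [List.drop_eq_nil_iff.mpr (by omega)] at ht
      exact List.cons_ne_nil _ _ ht
    have hxn : x[k]? = some xn := by
      have h0 : (x.drop k)[0]? = some xn := by rw [← ht]; rfl
      rw [List.getElem?_drop] at h0
      simpa using h0
    have hrest : rest = x.drop (k + 1) := by
      have : (x.drop k).drop 1 = x.drop (k + 1) := by
        rw [List.drop_drop]
      rw [← this, ← ht]
      rfl
    simp only [List.foldl_cons, PySem.List.enumerate_cons, pvFA, pvFB]
    by_cases hc1 : 1 > xn * pt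
    · simp only [hc1, if_pos]
      by_cases hc2 : (1 : Int) > bp
      · simp only [hc2, if_pos]
        have := ih (k + 1) (k + 1) (k + 1) (k + 1) 1 1 hrest (le_refl _) (le_refl _) (le_refl _)
        rw [pvSeg_refl] at this
        simpa using this
      · simp only [hc2]
        have := ih (k + 1) (k + 1) bs be 1 bp hrest (le_refl _) hbs (by omega)
        rw [pvSeg_refl] at this
        simpa using this
    · simp only [hc1, List.map_cons, List.map_nil]
      rw [show pvSeg x ts k ++ [xn] = pvSeg x ts (k + 1) from
        (pvSeg_succ x ts k xn hts hxn).symm]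
      by_cases hc2 : xn * pt > bp
      · have := ih (k + 1) ts ts (k + 1) (xn * pt) (xn * pt) hrest (by omega) (by omega) (le_refl _)
        push_cast at this
        simpa [hc2] using this
      · have := ih (k + 1) ts bs be (xn * pt) bp hrest (by omega) hbs (by omega)
        push_cast at this
        simpa [hc2] using this


-- ===== VERDICT (by name: the statement is the Claim_ definition above) =====
theorem bellman_product_spec : Claim_equal_bellman_product := by
  intro x _
  show bellman_product x = bellman_product_alt x
  rw [pv_portA_eq, pv_portB_eq]
  have h := pv_loop x x 0 0 0 0 1 1 rfl (le_refl 0) (le_refl 0) (le_refl 0)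
  rw [pvSeg_refl] at h
  simpa using h
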